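-- pv_equiv track=rewrite | github.com/helyio-dev/codingame | puzzle/easy/Bijective Numeration/Python.py | decimary_to_decimal
-- ===== SOURCE A (Python) =====
-- def decimary_to_decimal(s):
--     result = 0
--     for ch in s:
--         if ch == 'A':
--             digit = 10
--         else:
--             digit = int(ch)
--         result = result * 10 + digit
--     return result
-- ===== SOURCE B (Python) =====
-- def decimary_to_decimal(s):
--     n = len(s)
--     digits = [10 if ch == 'A' else int(ch) for ch in s]
--     return sum(d * 10 ** (n - 1 - i) for i, d in enumerate(digits))
-- ===== Notes on version B (the rewrite author's own statement) =====
-- stated objective: alternative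
-- what changed: B is a staged positional evaluation: it first maps the string to its digit list, then sums digit * 10**(n-1-i) over the enumerated digits, instead of A's single Horner fold result*10+digit.
import Mathlib
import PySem

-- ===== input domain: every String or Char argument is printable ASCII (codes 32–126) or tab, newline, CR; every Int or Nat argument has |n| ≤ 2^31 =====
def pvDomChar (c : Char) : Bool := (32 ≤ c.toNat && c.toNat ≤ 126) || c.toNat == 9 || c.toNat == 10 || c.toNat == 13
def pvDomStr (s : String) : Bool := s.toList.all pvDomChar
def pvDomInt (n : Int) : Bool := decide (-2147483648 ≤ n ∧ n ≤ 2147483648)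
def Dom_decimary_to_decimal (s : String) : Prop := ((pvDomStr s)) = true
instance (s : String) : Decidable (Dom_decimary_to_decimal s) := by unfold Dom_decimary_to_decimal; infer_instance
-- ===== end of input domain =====

-- B replaces A's single Horner fold by two staged passes: map to digits, then sum digit*10^(n-1-i) (alternative decomposition, same cost).


-- ===== PORT A =====
-- digit of one character (Pre_ guarantees the int() branch succeeds, so getD 0 is never taken)
def pvDigitA (c : Char) : Int := if c == 'A' then 10 else (PySem.Int.ofChars? [c]).getD 0

def decimary_to_decimal (s : String) : Int :=
  s.toList.foldl (fun result ch => result * 10 + pvDigitA ch) 0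

-- ===== PORT B =====
-- the digit-list comprehension from Source B
def pvDigits (s : String) : List Int :=
  s.toList.map (fun ch => if ch == 'A' then (10 : Int) else (PySem.Int.ofChars? [ch]).getD 0)

def decimary_to_decimal_alt (s : String) : Int :=
  ((pvDigits s).zipIdx.map (fun p => p.1 * 10 ^ (s.toList.length - 1 - p.2))).sum

-- ===== PRECONDITION & SPEC =====
-- Pre_ excludes exactly the inputs where Python A raises ValueError: any character other than 'A' or a decimal digit.
def Pre_decimary_to_decimal (s : String) : Prop :=
  (s.toList.all (fun c => c == 'A' || ('0' ≤ c && c ≤ '9'))) = true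
instance (s : String) : Decidable (Pre_decimary_to_decimal s) := by unfold Pre_decimary_to_decimal; infer_instance
def pvWitness_decimary_to_decimal : String := "1A07"

def Spec_decimary_to_decimal (s : String) (out : Int) : Prop := out = decimary_to_decimal_alt s
instance (s : String) (out : Int) : Decidable (Spec_decimary_to_decimal s out) := by unfold Spec_decimary_to_decimal; infer_instance

-- ===== CLAIM =====
def Claim_equal_decimary_to_decimal : Prop :=
  ∀ (s : String), Dom_decimary_to_decimal s → Pre_decimary_to_decimal s →
    Spec_decimary_to_decimal s (decimary_to_decimal s)

-- ===== LEMMAS AND PROOFS =====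
-- positional sum of a digit list equals the Horner fold
lemma pv_pos_sum (l : List Int) :
    ((l.zipIdx.map (fun p => p.1 * 10 ^ (l.length - 1 - p.2))).sum)
      = l.foldl (fun r d => r * 10 + d) 0 := by
  induction l using List.reverseRecOn with
  | nil => simp
  | append_singleton l c ih =>
      rw [List.zipIdx_append, List.foldl_append]
      simp only [List.map_append, List.sum_append, List.zipIdx_singleton, List.map_cons,
        List.map_nil, List.sum_cons, List.sum_nil, List.length_append, List.length_singleton,
        List.foldl_cons, List.foldl_nil]
      rw [← ih]
      have h : ∀ p ∈ l.zipIdx,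
          (fun p : Int × Nat => p.1 * 10 ^ (l.length + 1 - 1 - p.2)) p
            = 10 * (p.1 * 10 ^ (l.length - 1 - p.2)) := by
        intro p hp
        have hlt : p.2 < l.length := List.snd_lt_of_mem_zipIdx hp
        simp only []
        have he : l.length + 1 - 1 - p.2 = (l.length - 1 - p.2) + 1 := by omega
        rw [he, pow_succ]; ring
      rw [List.map_congr_left h, List.sum_map_mul_left]
      simp
      ring

-- ===== VERDICT =====
theorem decimary_to_decimal_spec : Claim_equal_decimary_to_decimal := by
  intro s _ _
  unfold Spec_decimary_to_decimal decimary_to_decimal_alt decimary_to_decimal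
  have hn : s.toList.length = (pvDigits s).length := by simp [pvDigits]
  rw [hn, pv_pos_sum, pvDigits, List.foldl_map]
  rfl
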